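-- pv_equiv track=rewrite | github.com/Yunjae-Rhee/Maritime_Search_UAV_Advanced | route_update_advanced.py | DFS_Order_With_Levels
-- ===== SOURCE A (Python) =====
-- import collections
-- from typing import List, Tuple, Dict, Set, Any
--
-- def DFS_Order_With_Levels(adj: Dict[int, Set[int]], root: int, N: int) -> Tuple[List[int], List[int]]:
--     if N == 0: return [], []
--     levels = [-1] * N
--     if root < N and root in adj:
--         levels[root] = 0
--         queue = collections.deque([root])
--         seen = {root}
--         while queue:
--             u = queue.popleft()
--             for v in sorted(list(adj.get(u, set()))):
--                 if v not in seen: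
--                     seen.add(v); levels[v] = levels[u] + 1; queue.append(v)
--     order: List[int] = []; seen2 = [False] * N
--     if root < N and root in adj:
--         stack = [root]; seen2[root] = True
--         while stack:
--             u = stack.pop(); order.append(u)
--             for v in sorted(list(adj.get(u, set())), reverse=True):
--                 if not seen2[v] and levels[v] > levels[u]:
--                     seen2[v] = True; stack.append(v)
--     return order, levels
-- ===== SOURCE B (Python) =====
-- def DFS_Order_With_Levels(adj, root, N):
--     if N == 0 or root >= N or root not in adj:
--         return [], [-1] * N
--     # level-synchronous BFS: process whole frontiers instead of a FIFO queue
--     depth = [0 if i == root else -1 for i in range(N)]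
--     reached = {root}
--     frontier = [root]
--     while frontier:
--         nxt = []
--         for u in frontier:
--             fresh = sorted(adj.get(u, set()) - reached)
--             reached.update(fresh)
--             for v in fresh:
--                 depth[v] = depth[u] + 1
--             nxt += fresh
--         frontier = nxt
--     out = []
--     vis = [i == root for i in range(N)]
--
--     def dfs(u):
--         # claim admissible children far-to-near (as the stack version marks them),
--         # then recurse near-to-far
--         out.append(u)
--         kids = []
--         for v in sorted(adj.get(u, set()), reverse=True):
--             if vis[v] or depth[v] <= depth[u]:
--                 continue
--             vis[v] = True
--             kids.append(v)
--         for v in reversed(kids):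
--             dfs(v)
--
--     dfs(root)
--     return out, depth
-- ===== Notes on version B (the rewrite author's own statement) =====
-- stated objective: alternative
-- what changed: The FIFO-queue BFS writing into a preallocated array is replaced by a level-synchronous frontier BFS (per round, each node's unseen neighbours are taken as a sorted set-difference and marked in a batch), the explicit-stack DFS by a recursive helper that first claims a node's admissible children and then recurses into them, and the three root guards are merged into one early return with comprehension-built tables.
-- outside the precondition, e.g. on DFS_Order_With_Levels({0: {5}}, 0, 2): A raises IndexError, B raises IndexError
import Mathlib
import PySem

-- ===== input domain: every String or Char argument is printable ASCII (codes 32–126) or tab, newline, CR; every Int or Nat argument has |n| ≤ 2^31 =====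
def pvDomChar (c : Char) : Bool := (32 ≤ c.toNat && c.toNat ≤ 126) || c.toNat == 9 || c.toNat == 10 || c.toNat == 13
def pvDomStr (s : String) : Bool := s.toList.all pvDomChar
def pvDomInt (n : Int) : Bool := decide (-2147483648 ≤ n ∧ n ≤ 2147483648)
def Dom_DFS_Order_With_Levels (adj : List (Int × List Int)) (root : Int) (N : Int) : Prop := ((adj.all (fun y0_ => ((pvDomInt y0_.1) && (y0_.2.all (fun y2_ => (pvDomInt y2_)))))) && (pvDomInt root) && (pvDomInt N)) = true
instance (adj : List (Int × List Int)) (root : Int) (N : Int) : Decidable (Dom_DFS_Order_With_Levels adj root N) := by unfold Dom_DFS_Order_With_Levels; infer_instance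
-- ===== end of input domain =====

-- B replaces A's FIFO-queue BFS by a level-synchronous frontier BFS (per round each
-- node's unseen neighbours are a sorted set-difference, marked in a batch), and A's
-- explicit-stack DFS by a recursive helper that first claims a node's admissible
-- children and then recurses into them; the root guards are merged; same values.

-- Upper bound on the number of loop iterations / recursion depth either traversal can
-- perform (each enqueue/push marks a fresh node): used only as a totality (fuel) guard.
def pvSumLens (adj : List (Int × List Int)) : Nat :=
  adj.foldl (fun a p => a + p.2.length) 0

def pvFuel (adj : List (Int × List Int)) (N : Int) : Nat :=
  N.toNat + pvSumLens adj + 1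

-- fuel for B's round loop: at most N+1 nonempty rounds occur (each one after the first
-- starts from freshly discovered nodes), again only a totality guard.
def pvFuelB (N : Int) : Nat := N.toNat + 3

-- ===== PORT A =====
-- sorted(list(adj.get(u, set())))  (ascending; a Python set is PySem.Set)
def pvNbrsAscA (adj : List (Int × List Int)) (u : Int) : List Int :=
  PySem.List.sorted (PySem.Set.ofList ((PySem.Dict.mk adj).getD u [])) (fun x => x) false

-- sorted(list(adj.get(u, set())), reverse=True)
def pvNbrsDescA (adj : List (Int × List Int)) (u : Int) : List Int :=
  PySem.List.sorted (PySem.Set.ofList ((PySem.Dict.mk adj).getD u [])) (fun x => x) true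

-- A's `while queue:` BFS loop; the deque is a list with its front at the head.
-- Fuel only guards totality (one unit per iteration; pvFuel suffices on Pre_ inputs).
def pvBfsLoopA (adj : List (Int × List Int)) :
    Nat → List Int → PySem.Set Int → List Int → List Int
  | 0, _, _, levels => levels
  | _ + 1, [], _, levels => levels
  | fuel + 1, u :: queue, seen, levels =>
    let r := (pvNbrsAscA adj u).foldl
      (fun (s : List Int × PySem.Set Int × List Int) v =>
        if PySem.Set.contains s.2.1 v = false then
          (s.1 ++ [v], PySem.Set.add s.2.1 v,
            PySem.List.pySetD s.2.2 v (PySem.List.pyGetD s.2.2 u (-1) + 1))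
        else s)
      (queue, seen, levels)
    pvBfsLoopA adj fuel r.1 r.2.1 r.2.2

-- A's `while stack:` DFS loop; the Python stack grows/pops at the list's end, modelled
-- with the top at the head (pushing the reverse-sorted neighbours by consing).
def pvDfsLoopA (adj : List (Int × List Int)) (levels : List Int) :
    Nat → List Int → List Bool → List Int → List Bool × List Int
  | 0, _, seen2, order => (seen2, order)
  | _ + 1, [], seen2, order => (seen2, order)
  | fuel + 1, u :: stack, seen2, order =>
    let order' := order ++ [u]
    let r := (pvNbrsDescA adj u).foldl
      (fun (s : List Int × List Bool) v =>
        if PySem.List.pyGetD s.2 v false = false ∧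
            PySem.List.pyGetD levels v (-1) > PySem.List.pyGetD levels u (-1) then
          (v :: s.1, PySem.List.pySetD s.2 v true)
        else s)
      (stack, seen2)
    pvDfsLoopA adj levels fuel r.1 r.2 order'

def DFS_Order_With_Levels (adj : List (Int × List Int)) (root : Int) (N : Int) :
    List Int × List Int :=
  if N == 0 then ([], []) else
  let levels0 : List Int := List.replicate N.toNat (-1)
  if root < N ∧ ((PySem.Dict.mk adj).get? root).isSome then
    let levels := pvBfsLoopA adj (pvFuel adj N) [root] (PySem.Set.ofList [root])
      (PySem.List.pySetD levels0 root 0)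
    let seen2 : List Bool := PySem.List.pySetD (List.replicate N.toNat false) root true
    let r := pvDfsLoopA adj levels (pvFuel adj N) [root] seen2 []
    (r.2, levels)
  else ([], levels0)

-- ===== PORT B =====
-- sorted(nbrs, reverse=rev) for nbrs = adj.get(u, set())
def pvNbrsB (adj : List (Int × List Int)) (u : Int) (rev : Bool) : List Int :=
  let nbrs := (PySem.Dict.mk adj).getD u []
  PySem.List.sorted (PySem.Set.ofList nbrs) (fun x => x) rev

-- one frontier node u: fresh = sorted(adj.get(u, set()) - reached), mark all, set depth
def pvBfsStepB (adj : List (Int × List Int)) (st : List Int × PySem.Set Int × List Int)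
    (u : Int) : List Int × PySem.Set Int × List Int :=
  let fresh := PySem.List.sorted
    (PySem.Set.diff (PySem.Set.ofList ((PySem.Dict.mk adj).getD u [])) st.2.1)
    (fun x => x) false
  let reached' := PySem.Set.update st.2.1 fresh
  let depth' := fresh.foldl
    (fun lv w => PySem.List.pySetD lv w (PySem.List.pyGetD lv u (-1) + 1)) st.2.2
  (st.1 ++ fresh, reached', depth')

-- B's `while frontier:` round loop (fuel = one unit per round, a totality guard only)
def pvBfsLoopB (adj : List (Int × List Int)) :
    Nat → List Int → PySem.Set Int → List Int → List Int
  | 0, _, _, depth => depth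
  | fuel + 1, frontier, reached, depth =>
    if frontier.isEmpty then depth
    else
      let t := frontier.foldl (pvBfsStepB adj) ([], reached, depth)
      pvBfsLoopB adj fuel t.1 t.2.1 t.2.2

-- B's recursive dfs(u): append u, claim admissible children far-to-near (descending,
-- as the stack version marks them), then recurse near-to-far (the list reversed).
def pvDfsB (adj : List (Int × List Int)) (depth : List Int) :
    Nat → Int → List Bool × List Int → List Bool × List Int
  | 0, _, st => st
  | fuel + 1, u, (vis, out) =>
    let out' := out ++ [u]
    let t := (pvNbrsB adj u true).foldl
      (fun (st : List Int × List Bool) w =>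
        if PySem.List.pyGetD st.2 w false = true ∨
            PySem.List.pyGetD depth w (-1) ≤ PySem.List.pyGetD depth u (-1) then
          st
        else (st.1 ++ [w], PySem.List.pySetD st.2 w true)) ([], vis)
    t.1.reverse.foldl (fun st w => pvDfsB adj depth fuel w st) (t.2, out')

def DFS_Order_With_Levels_alt (adj : List (Int × List Int)) (root : Int) (N : Int) :
    List Int × List Int :=
  if N = 0 ∨ N ≤ root ∨ ((PySem.Dict.mk adj).get? root) = none then
    ([], List.replicate N.toNat (-1))
  else
    let depth := pvBfsLoopB adj (pvFuelB N) [root]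
      (PySem.Set.ofList [root])
      ((PySem.List.pyRange 0 N 1).map (fun i => if i == root then 0 else -1))
    let vis : List Bool := (PySem.List.pyRange 0 N 1).map (fun i => i == root)
    let t := pvDfsB adj depth (pvFuel adj N) root (vis, [])
    (t.2, depth)

-- ===== PRECONDITION & SPEC =====
-- Pre_ restricts, when the root guard fires, all node ids (the root and every adjacency
-- value) to the natural domain [0, N): ids ≥ N reached by the search make A raise
-- IndexError, and negative ids hit Python's negative-index wraparound on levels/seen2.
def Pre_DFS_Order_With_Levels (adj : List (Int × List Int)) (root : Int) (N : Int) : Prop :=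
  (root < N ∧ ((PySem.Dict.mk adj).get? root).isSome) →
    (0 ≤ root ∧ ∀ p ∈ adj, ∀ v ∈ p.2, 0 ≤ v ∧ v < N)

instance (adj : List (Int × List Int)) (root : Int) (N : Int) :
    Decidable (Pre_DFS_Order_With_Levels adj root N) := by
  unfold Pre_DFS_Order_With_Levels; infer_instance

def pvWitness_DFS_Order_With_Levels : (List (Int × List Int)) × Int × Int :=
  ([(0, [1, 2]), (1, [0, 2]), (2, [])], 0, 3)

def Spec_DFS_Order_With_Levels (adj : List (Int × List Int)) (root : Int) (N : Int)
    (out : List Int × List Int) : Prop := out = DFS_Order_With_Levels_alt adj root N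
instance (adj : List (Int × List Int)) (root : Int) (N : Int) (out : List Int × List Int) :
    Decidable (Spec_DFS_Order_With_Levels adj root N out) := by
  unfold Spec_DFS_Order_With_Levels; infer_instance

-- ===== CLAIM (what is proved, stated in full; the proofs are below) =====
def Claim_equal_DFS_Order_With_Levels : Prop := ∀ (adj : List (Int × List Int)) (root : Int) (N : Int), Dom_DFS_Order_With_Levels adj root N → Pre_DFS_Order_With_Levels adj root N → Spec_DFS_Order_With_Levels adj root N (DFS_Order_With_Levels adj root N)

-- ===== LEMMAS AND PROOFS =====

-- index in range of an n-slot table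
def pvGN (n : Nat) (v : Int) : Prop := 0 ≤ v ∧ v.toNat < n

-- all adjacency values in range
def pvHR (adj : List (Int × List Int)) (n : Nat) : Prop := ∀ p ∈ adj, ∀ v ∈ p.2, pvGN n v

lemma pvGet_set_ne (sn : List Bool) (v w : Int) (d : Bool) (h0v : 0 ≤ v) (h0w : 0 ≤ w)
    (h1w : w.toNat < sn.length) (hne : w ≠ v) :
    PySem.List.pyGetD (PySem.List.pySetD sn v true) w d = PySem.List.pyGetD sn w d := by
  rw [PySem.List.pySetD_of_nonneg _ _ h0v,
    PySem.List.pyGetD_eq_getElem _ _ h0w (by simp; omega),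
    PySem.List.pyGetD_eq_getElem _ _ h0w (by omega)]
  rw [List.getElem_set, if_neg (by omega)]

lemma pvMarkAll_length : ∀ (L : List Int) (sn : List Bool),
    (L.foldl (fun sn v => PySem.List.pySetD sn v true) sn).length = sn.length := by
  intro L
  induction L with
  | nil => intro sn; rfl
  | cons v L ih => intro sn; rw [List.foldl_cons, ih, PySem.List.length_pySetD]

lemma pvGet_markAll_notmem : ∀ (L : List Int) (sn : List Bool) (w : Int) (d : Bool),
    (∀ v ∈ L, 0 ≤ v) → 0 ≤ w → w.toNat < sn.length → w ∉ L →
    PySem.List.pyGetD (L.foldl (fun sn v => PySem.List.pySetD sn v true) sn) w d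
      = PySem.List.pyGetD sn w d := by
  intro L
  induction L with
  | nil => intro sn w d _ _ _ _; rfl
  | cons v L ih =>
    intro sn w d hL h0w h1w hw
    rw [List.foldl_cons,
      ih _ _ _ (fun x hx => hL x (List.mem_cons_of_mem _ hx)) h0w
        (by rw [PySem.List.length_pySetD]; exact h1w)
        (fun hmem => hw (List.mem_cons_of_mem _ hmem)),
      pvGet_set_ne sn v w d (hL v (List.mem_cons_self)) h0w h1w
        (fun h => hw (h ▸ List.mem_cons_self))]

lemma pvCount_set_le (sn : List Bool) (i : Nat) :
    (sn.set i true).count false ≤ sn.count false := by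
  by_cases h : i < sn.length
  · rw [List.count_set h]; split <;> split <;> simp_all
  · rw [List.set_eq_of_length_le (by omega)]

lemma pvCount_pySetD_le (sn : List Bool) (i : Int) :
    (PySem.List.pySetD sn i true).count false ≤ sn.count false := by
  by_cases h : 0 ≤ i
  · rw [PySem.List.pySetD_of_nonneg _ _ h]; exact pvCount_set_le _ _
  · simp only [PySem.List.pySetD, PySem.List.pySet?, PySem.List.pyIdx?]
    split
    · split
      · simp [pvCount_set_le]
      · simp
    · split
      · simp [pvCount_set_le]
      · simp

lemma pvCount_mark_fresh (sn : List Bool) (v : Int) (h0 : 0 ≤ v) (h1 : v.toNat < sn.length)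
    (hf : PySem.List.pyGetD sn v false = false) :
    (PySem.List.pySetD sn v true).count false + 1 = sn.count false := by
  rw [PySem.List.pyGetD_eq_getElem _ _ h0 (by omega)] at hf
  have hmem : false ∈ sn := hf ▸ List.getElem_mem _
  have hpos : 0 < sn.count false := List.count_pos_iff.mpr hmem
  rw [PySem.List.pySetD_of_nonneg _ _ h0, List.count_set h1, hf]
  simp; omega

lemma pvCount_markAll : ∀ (L : List Int) (sn : List Bool), L.Nodup →
    (∀ v ∈ L, pvGN sn.length v) → (∀ v ∈ L, PySem.List.pyGetD sn v false = false) →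
    (L.foldl (fun sn v => PySem.List.pySetD sn v true) sn).count false + L.length
      = sn.count false := by
  intro L
  induction L with
  | nil => intro sn _ _ _; simp
  | cons v L ih =>
    intro sn hnd hgn hf
    have h0v := (hgn v List.mem_cons_self).1
    have h1v := (hgn v List.mem_cons_self).2
    rw [List.foldl_cons]
    have := ih (PySem.List.pySetD sn v true) (List.nodup_cons.mp hnd).2
      (fun x hx => by rw [PySem.List.length_pySetD]; exact hgn x (List.mem_cons_of_mem _ hx))
      (fun x hx => by
        rw [pvGet_set_ne sn v x false h0v (hgn x (List.mem_cons_of_mem _ hx)).1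
          (hgn x (List.mem_cons_of_mem _ hx)).2
          (fun h => (List.nodup_cons.mp hnd).1 (h ▸ hx))]
        exact hf x (List.mem_cons_of_mem _ hx))
    have h2 := pvCount_mark_fresh sn v h0v h1v (hf v List.mem_cons_self)
    simp only [List.length_cons]
    omega

lemma pvMarkAll_set_comm : ∀ (F : List Int) (sn : List Bool) (a : Int),
    0 ≤ a → (∀ v ∈ F, 0 ≤ v) → a ∉ F →
    F.foldl (fun sn v => PySem.List.pySetD sn v true) (PySem.List.pySetD sn a true)
      = PySem.List.pySetD (F.foldl (fun sn v => PySem.List.pySetD sn v true) sn) a true := by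
  intro F
  induction F with
  | nil => intro sn a _ _ _; rfl
  | cons v F ih =>
    intro sn a h0a hF ha
    have h0v := hF v List.mem_cons_self
    have hne : v.toNat ≠ a.toNat := by
      intro h
      have hva : v = a := by omega
      exact ha (by rw [← hva]; exact List.mem_cons_self)
    rw [List.foldl_cons, List.foldl_cons,
      PySem.List.pySetD_of_nonneg _ _ h0a, PySem.List.pySetD_of_nonneg _ _ h0v,
      List.set_comm _ _ hne.symm ,
      ← PySem.List.pySetD_of_nonneg _ _ h0a, ← PySem.List.pySetD_of_nonneg _ _ h0v,
      ih _ _ h0a (fun x hx => hF x (List.mem_cons_of_mem _ hx))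
        (fun h => ha (List.mem_cons_of_mem _ h))]

lemma pvNbrsDesc_eq (adj : List (Int × List Int)) (u : Int) :
    pvNbrsDescA adj u = (pvNbrsAscA adj u).reverse := by
  unfold pvNbrsDescA pvNbrsAscA
  apply PySem.List.sorted_rev_eq_of_perm_of_pairwise_gt
  · exact (List.reverse_perm _).trans (PySem.List.sorted_perm _ _ _)
  · rw [List.pairwise_reverse]
    exact PySem.List.sorted_ofList_pairwise_lt _

lemma pvNbrsBRev_eq (adj : List (Int × List Int)) (u : Int) :
    pvNbrsB adj u true = (pvNbrsAscA adj u).reverse := pvNbrsDesc_eq adj u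

lemma pvNbrs_nodup (adj : List (Int × List Int)) (u : Int) : (pvNbrsAscA adj u).Nodup :=
  (PySem.List.sorted_perm _ _ _).symm.nodup (PySem.Set.nodup_ofList _)

lemma pvNbrs_GN (adj : List (Int × List Int)) (n : Nat) (u : Int) (hadj : pvHR adj n) :
    ∀ v ∈ pvNbrsAscA adj u, pvGN n v := by
  intro v hv
  unfold pvNbrsAscA at hv
  rw [PySem.List.mem_sorted, PySem.Set.mem_ofList, PySem.Dict.getD_eq_get?_getD] at hv
  cases hc : (PySem.Dict.mk adj).get? u with
  | none => rw [hc] at hv; simp at hv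
  | some vs =>
    rw [hc] at hv
    simp only [Option.getD_some] at hv
    exact hadj (u, vs) (PySem.Dict.mem_items_of_get?_eq_some _ hc) v hv

lemma pvPushFold (levels : List Int) (u : Int) :
    ∀ (L stk : List Int) (sn : List Bool), L.Nodup → (∀ v ∈ L, pvGN sn.length v) →
    L.reverse.foldl
      (fun (s : List Int × List Bool) v =>
        if PySem.List.pyGetD s.2 v false = false ∧
            PySem.List.pyGetD levels v (-1) > PySem.List.pyGetD levels u (-1) then
          (v :: s.1, PySem.List.pySetD s.2 v true)
        else s)
      (stk, sn)
    = ((L.filter (fun v => decide (PySem.List.pyGetD sn v false = false ∧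
          PySem.List.pyGetD levels v (-1) > PySem.List.pyGetD levels u (-1)))) ++ stk,
       (L.filter (fun v => decide (PySem.List.pyGetD sn v false = false ∧
          PySem.List.pyGetD levels v (-1) > PySem.List.pyGetD levels u (-1)))).foldl
         (fun sn v => PySem.List.pySetD sn v true) sn) := by
  intro L
  induction L with
  | nil => intro stk sn _ _; rfl
  | cons a L ih =>
    intro stk sn hnd hgn
    have h0a := (hgn a List.mem_cons_self).1
    have h1a := (hgn a List.mem_cons_self).2
    have hanotL : a ∉ L := (List.nodup_cons.mp hnd).1
    have hgn' : ∀ v ∈ L, pvGN sn.length v := fun v hv => hgn v (List.mem_cons_of_mem _ hv)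
    rw [List.reverse_cons, List.foldl_append,
      ih stk sn (List.nodup_cons.mp hnd).2 hgn']
    simp only [List.foldl_cons, List.foldl_nil]
    rw [pvGet_markAll_notmem _ sn a false
      (fun v hv => (hgn' v (List.mem_of_mem_filter hv)).1) h0a h1a
      (fun h => hanotL (List.mem_of_mem_filter h))]
    rw [List.filter_cons]
    by_cases hc : PySem.List.pyGetD sn a false = false ∧
        PySem.List.pyGetD levels a (-1) > PySem.List.pyGetD levels u (-1)
    · rw [if_pos hc, if_pos (by simpa using hc)]
      refine Prod.ext rfl ?_
      simp only [List.foldl_cons]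
      rw [pvMarkAll_set_comm _ sn a h0a
        (fun v hv => (hgn' v (List.mem_of_mem_filter hv)).1)
        (fun h => hanotL (List.mem_of_mem_filter h))]
    · rw [if_neg hc, if_neg (by simpa using hc)]

-- B's collect loop over the reverse-sorted neighbours: same filter and marks,
-- children accumulated in descending order
lemma pvCollectFold (levels : List Int) (u : Int) :
    ∀ (L acc : List Int) (sn : List Bool), L.Nodup → (∀ v ∈ L, pvGN sn.length v) →
    L.reverse.foldl
      (fun (s : List Int × List Bool) v =>
        if PySem.List.pyGetD s.2 v false = true ∨
            PySem.List.pyGetD levels v (-1) ≤ PySem.List.pyGetD levels u (-1) then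
          s
        else (s.1 ++ [v], PySem.List.pySetD s.2 v true))
      (acc, sn)
    = (acc ++ (L.filter (fun v => decide (PySem.List.pyGetD sn v false = false ∧
          PySem.List.pyGetD levels v (-1) > PySem.List.pyGetD levels u (-1)))).reverse,
       (L.filter (fun v => decide (PySem.List.pyGetD sn v false = false ∧
          PySem.List.pyGetD levels v (-1) > PySem.List.pyGetD levels u (-1)))).foldl
         (fun sn v => PySem.List.pySetD sn v true) sn) := by
  intro L
  induction L with
  | nil => intro acc sn _ _; simp
  | cons a L ih =>
    intro acc sn hnd hgn
    have h0a := (hgn a List.mem_cons_self).1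
    have h1a := (hgn a List.mem_cons_self).2
    have hanotL : a ∉ L := (List.nodup_cons.mp hnd).1
    have hgn' : ∀ v ∈ L, pvGN sn.length v := fun v hv => hgn v (List.mem_cons_of_mem _ hv)
    rw [List.reverse_cons, List.foldl_append,
      ih acc sn (List.nodup_cons.mp hnd).2 hgn']
    simp only [List.foldl_cons, List.foldl_nil]
    rw [pvGet_markAll_notmem _ sn a false
      (fun v hv => (hgn' v (List.mem_of_mem_filter hv)).1) h0a h1a
      (fun h => hanotL (List.mem_of_mem_filter h))]
    rw [List.filter_cons]
    by_cases hc : PySem.List.pyGetD sn a false = false ∧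
        PySem.List.pyGetD levels a (-1) > PySem.List.pyGetD levels u (-1)
    · rw [if_neg (show ¬ (PySem.List.pyGetD sn a false = true ∨
          PySem.List.pyGetD levels a (-1) ≤ PySem.List.pyGetD levels u (-1)) by
        rintro (h | h)
        · rw [hc.1] at h
          exact absurd h (by simp)
        · have := hc.2
          omega), if_pos (by simpa using hc)]
      refine Prod.ext ?_ ?_
      · simp [List.append_assoc]
      · simp only [List.foldl_cons]
        rw [pvMarkAll_set_comm _ sn a h0a
          (fun v hv => (hgn' v (List.mem_of_mem_filter hv)).1)
          (fun h => hanotL (List.mem_of_mem_filter h))]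
    · rw [if_pos (show PySem.List.pyGetD sn a false = true ∨
          PySem.List.pyGetD levels a (-1) ≤ PySem.List.pyGetD levels u (-1) by
        by_cases hx : PySem.List.pyGetD sn a false = false
        · right
          have hq : ¬ PySem.List.pyGetD levels a (-1) > PySem.List.pyGetD levels u (-1) :=
            fun hq => hc ⟨hx, hq⟩
          omega
        · left
          cases hb : PySem.List.pyGetD sn a false
          · exact absurd hb hx
          · rfl), if_neg (by simpa using hc)]

-- the collect loop leaves seen2's length unchanged and never unmarks a cell
lemma pvCollect_length (levels : List Int) (u : Int) :
    ∀ (L : List Int) (s : List Int × List Bool),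
    ((L.foldl
      (fun (s : List Int × List Bool) v =>
        if PySem.List.pyGetD s.2 v false = true ∨
            PySem.List.pyGetD levels v (-1) ≤ PySem.List.pyGetD levels u (-1) then
          s
        else (s.1 ++ [v], PySem.List.pySetD s.2 v true)) s).2).length = s.2.length := by
  intro L
  induction L with
  | nil => intro s; rfl
  | cons v L ih =>
    intro s
    rw [List.foldl_cons, ih]
    split
    · rfl
    · exact PySem.List.length_pySetD _ _ _

lemma pvCollect_count_le (levels : List Int) (u : Int) :
    ∀ (L : List Int) (s : List Int × List Bool),
    ((L.foldl
      (fun (s : List Int × List Bool) v =>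
        if PySem.List.pyGetD s.2 v false = true ∨
            PySem.List.pyGetD levels v (-1) ≤ PySem.List.pyGetD levels u (-1) then
          s
        else (s.1 ++ [v], PySem.List.pySetD s.2 v true)) s).2).count false
      ≤ s.2.count false := by
  intro L
  induction L with
  | nil => intro s; exact le_refl _
  | cons v L ih =>
    intro s
    rw [List.foldl_cons]
    refine le_trans (ih _) ?_
    split
    · exact le_refl _
    · exact pvCount_pySetD_le _ _

lemma pvDfsB_length (adj : List (Int × List Int)) (levels : List Int) :
    ∀ (f : Nat) (u : Int) (s : List Bool × List Int),
      (pvDfsB adj levels f u s).1.length = s.1.length := by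
  intro f
  induction f with
  | zero => intro u s; rfl
  | succ f ih =>
    intro u s
    obtain ⟨sn, order⟩ := s
    simp only [pvDfsB]
    have aux : ∀ (L : List Int) (t : List Bool × List Int),
        (L.foldl (fun s v => pvDfsB adj levels f v s) t).1.length = t.1.length := by
      intro L
      induction L with
      | nil => intro t; rfl
      | cons v L ihL => intro t; rw [List.foldl_cons, ihL, ih]
    rw [aux]
    exact pvCollect_length levels u _ _

lemma pvDfsB_count_le (adj : List (Int × List Int)) (levels : List Int) :
    ∀ (f : Nat) (u : Int) (s : List Bool × List Int),
      (pvDfsB adj levels f u s).1.count false ≤ s.1.count false := by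
  intro f
  induction f with
  | zero => intro u s; exact le_refl _
  | succ f ih =>
    intro u s
    obtain ⟨sn, order⟩ := s
    simp only [pvDfsB]
    have aux : ∀ (L : List Int) (t : List Bool × List Int),
        (L.foldl (fun s v => pvDfsB adj levels f v s) t).1.count false ≤ t.1.count false := by
      intro L
      induction L with
      | nil => intro t; exact le_refl _
      | cons v L ihL =>
        intro t
        rw [List.foldl_cons]
        exact le_trans (ihL _) (ih v t)
    exact le_trans (aux _ _) (pvCollect_count_le levels u _ _)

lemma pvChildren_spec (adj : List (Int × List Int)) (levels : List Int) (n : Nat)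
    (hadj : pvHR adj n) (u : Int) (sn : List Bool) (hlen : sn.length = n) :
    ((pvNbrsAscA adj u).filter (fun v => decide (PySem.List.pyGetD sn v false = false ∧
        PySem.List.pyGetD levels v (-1) > PySem.List.pyGetD levels u (-1)))).Nodup ∧
    (∀ v ∈ (pvNbrsAscA adj u).filter (fun v => decide (PySem.List.pyGetD sn v false = false ∧
        PySem.List.pyGetD levels v (-1) > PySem.List.pyGetD levels u (-1))), pvGN sn.length v) ∧
    (∀ v ∈ (pvNbrsAscA adj u).filter (fun v => decide (PySem.List.pyGetD sn v false = false ∧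
        PySem.List.pyGetD levels v (-1) > PySem.List.pyGetD levels u (-1))),
      PySem.List.pyGetD sn v false = false) := by
  refine ⟨(pvNbrs_nodup adj u).filter _, ?_, ?_⟩
  · intro v hv
    rw [hlen]
    exact pvNbrs_GN adj n u hadj v (List.mem_of_mem_filter hv)
  · intro v hv
    have := List.of_mem_filter hv
    exact (of_decide_eq_true this).1

lemma pvFoldStab (adj : List (Int × List Int)) (levels : List Int) (n : Nat) (f f' : Nat)
    (IH : ∀ (u : Int) (sn : List Bool) (order : List Int), sn.length = n →
      sn.count false < f → sn.count false < f' →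
      pvDfsB adj levels f u (sn, order) = pvDfsB adj levels f' u (sn, order)) :
    ∀ (L : List Int) (s : List Bool × List Int), s.1.length = n →
      s.1.count false < f → s.1.count false < f' →
      L.foldl (fun s v => pvDfsB adj levels f v s) s
        = L.foldl (fun s v => pvDfsB adj levels f' v s) s := by
  intro L
  induction L with
  | nil => intro s _ _ _; rfl
  | cons v L ihL =>
    intro s hlen h1 h2
    obtain ⟨sn, order⟩ := s
    rw [List.foldl_cons, List.foldl_cons, ← IH v sn order hlen h1 h2]
    exact ihL _ ((pvDfsB_length adj levels f v (sn, order)).trans hlen)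
      (lt_of_le_of_lt (pvDfsB_count_le adj levels f v (sn, order)) h1)
      (lt_of_le_of_lt (pvDfsB_count_le adj levels f v (sn, order)) h2)

lemma pvDfsBStab (adj : List (Int × List Int)) (levels : List Int) (n : Nat)
    (hadj : pvHR adj n) :
    ∀ (f f' : Nat) (u : Int) (sn : List Bool) (order : List Int), sn.length = n →
      sn.count false < f → sn.count false < f' →
      pvDfsB adj levels f u (sn, order) = pvDfsB adj levels f' u (sn, order) := by
  intro f
  induction f with
  | zero => intro f' u sn order _ h _; omega
  | succ f ih =>
    intro f' u sn order hlen h1 h2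
    obtain ⟨f', rfl⟩ : ∃ g, f' = g + 1 := ⟨f' - 1, by omega⟩
    simp only [pvDfsB]
    rw [pvNbrsBRev_eq adj u,
      pvCollectFold levels u (pvNbrsAscA adj u) [] sn (pvNbrs_nodup adj u)
        (fun v hv => by rw [hlen]; exact pvNbrs_GN adj n u hadj v hv)]
    simp only [List.nil_append, List.reverse_reverse]
    set C := (pvNbrsAscA adj u).filter (fun v => decide (PySem.List.pyGetD sn v false = false ∧
        PySem.List.pyGetD levels v (-1) > PySem.List.pyGetD levels u (-1))) with hC
    rcases List.eq_nil_or_concat' C with hCnil | ⟨C', a, hCc⟩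
    · rw [hCnil]; rfl
    · have hne : C ≠ [] := by rw [hCc]; simp
      obtain ⟨hnd, hgn, hfresh⟩ := pvChildren_spec adj levels n hadj u sn hlen
      have hcount := pvCount_markAll C sn hnd hgn hfresh
      have hlen2 : 1 ≤ C.length := by
        cases hc : C with
        | nil => exact absurd hc hne
        | cons x xs => simp
      set sn' := C.foldl (fun sn v => PySem.List.pySetD sn v true) sn with hsn'
      apply pvFoldStab adj levels n f f'
      · intro u2 sn2 order2 hlen2 hf1 hf2
        exact ih f' u2 sn2 order2 hlen2 hf1 hf2
      · exact (pvMarkAll_length C sn).trans hlen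
      · simp only []
        omega
      · simp only []
        omega

lemma pvFold_length (adj : List (Int × List Int)) (levels : List Int) (f : Nat) :
    ∀ (L : List Int) (s : List Bool × List Int),
      (L.foldl (fun s v => pvDfsB adj levels f v s) s).1.length = s.1.length := by
  intro L
  induction L with
  | nil => intro s; rfl
  | cons v L ihL => intro s; rw [List.foldl_cons, ihL, pvDfsB_length]

lemma pvFold_count_le (adj : List (Int × List Int)) (levels : List Int) (f : Nat) :
    ∀ (L : List Int) (s : List Bool × List Int),
      (L.foldl (fun s v => pvDfsB adj levels f v s) s).1.count false ≤ s.1.count false := by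
  intro L
  induction L with
  | nil => intro s; exact le_refl _
  | cons v L ihL =>
    intro s
    rw [List.foldl_cons]
    exact le_trans (ihL _) (pvDfsB_count_le adj levels f v s)

lemma pvMain (adj : List (Int × List Int)) (levels : List Int) (n : Nat) (hadj : pvHR adj n) :
    ∀ (k : Nat) (sn : List Bool), sn.count false ≤ k → sn.length = n →
    ∀ (stack order : List Int) (fA fB : Nat),
      sn.count false + stack.length ≤ fA → sn.count false < fB →
      pvDfsLoopA adj levels fA stack sn order
        = stack.foldl (fun s v => pvDfsB adj levels fB v s) (sn, order) := by
  intro k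
  induction k using Nat.strong_induction_on with
  | _ k IHk =>
    intro sn hk hlen stack
    induction stack with
    | nil =>
      intro order fA fB _ _
      cases fA <;> rfl
    | cons u st ih =>
      intro order fA fB hfA hfB
      have hlcons : (u :: st).length = st.length + 1 := rfl
      obtain ⟨fA', rfl⟩ : ∃ g, fA = g + 1 := ⟨fA - 1, by omega⟩
      obtain ⟨fB', rfl⟩ : ∃ g, fB = g + 1 := ⟨fB - 1, by omega⟩
      simp only [pvDfsLoopA]
      rw [pvNbrsDesc_eq,
        pvPushFold levels u (pvNbrsAscA adj u) st sn (pvNbrs_nodup adj u)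
          (fun v hv => by rw [hlen]; exact pvNbrs_GN adj n u hadj v hv)]
      rw [List.foldl_cons]
      have hhead : pvDfsB adj levels (fB' + 1) u (sn, order)
          = ((pvNbrsAscA adj u).filter
              (fun v => decide (PySem.List.pyGetD sn v false = false ∧
                PySem.List.pyGetD levels v (-1) > PySem.List.pyGetD levels u (-1)))).foldl
              (fun s v => pvDfsB adj levels fB' v s)
              (((pvNbrsAscA adj u).filter
                (fun v => decide (PySem.List.pyGetD sn v false = false ∧
                  PySem.List.pyGetD levels v (-1) > PySem.List.pyGetD levels u (-1)))).foldl
                (fun sn v => PySem.List.pySetD sn v true) sn, order ++ [u]) := by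
        simp only [pvDfsB]
        rw [pvNbrsBRev_eq adj u,
          pvCollectFold levels u (pvNbrsAscA adj u) [] sn (pvNbrs_nodup adj u)
            (fun v hv => by rw [hlen]; exact pvNbrs_GN adj n u hadj v hv)]
        simp only [List.nil_append, List.reverse_reverse]
      rw [hhead]
      set C := (pvNbrsAscA adj u).filter
        (fun v => decide (PySem.List.pyGetD sn v false = false ∧
          PySem.List.pyGetD levels v (-1) > PySem.List.pyGetD levels u (-1))) with hC
      rcases List.eq_nil_or_concat' C with hCnil | ⟨C', a, hCc⟩
      · rw [hCnil]
        simp only [List.nil_append, List.foldl_nil]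
        exact ih (order ++ [u]) fA' (fB' + 1) (by omega) hfB
      · have hCne : C ≠ [] := by rw [hCc]; simp
        have hC1 : 1 ≤ C.length := by
          cases hc : C with
          | nil => exact absurd hc hCne
          | cons x xs => simp
        obtain ⟨hnd, hgn, hfresh⟩ := pvChildren_spec adj levels n hadj u sn hlen
        have hcount := pvCount_markAll C sn (hC ▸ hnd) (hC ▸ hgn) (hC ▸ hfresh)
        have hlen' : (C.foldl (fun sn v => PySem.List.pySetD sn v true) sn).length = n :=
          (pvMarkAll_length C sn).trans hlen
        have hlapp : (C ++ st).length = C.length + st.length := List.length_append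
        rw [IHk (k - 1) (by omega)
          (C.foldl (fun sn v => PySem.List.pySetD sn v true) sn) (by omega) hlen'
          (C ++ st) (order ++ [u]) fA' fB' (by omega) (by omega)]
        rw [List.foldl_append]
        exact pvFoldStab adj levels n fB' (fB' + 1)
          (fun u2 sn2 order2 hl h1 h2 =>
            pvDfsBStab adj levels n hadj fB' (fB' + 1) u2 sn2 order2 hl h1 h2)
          st _
          ((pvFold_length adj levels fB' C _).trans hlen')
          (lt_of_le_of_lt (pvFold_count_le adj levels fB' C _)
            (show List.count false (C.foldl (fun sn v => PySem.List.pySetD sn v true) sn) < fB'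
              by omega))
          (lt_of_le_of_lt (pvFold_count_le adj levels fB' C _)
            (show List.count false (C.foldl (fun sn v => PySem.List.pySetD sn v true) sn) < fB' + 1
              by omega))

-- ===== BFS simulation: A's FIFO queue vs B's frontier rounds =====

-- A's inner-loop body, named for the proofs
def pvALam (u : Int) (s : List Int × PySem.Set Int × List Int) (v : Int) :
    List Int × PySem.Set Int × List Int :=
  if PySem.Set.contains s.2.1 v = false then
    (s.1 ++ [v], PySem.Set.add s.2.1 v,
      PySem.List.pySetD s.2.2 v (PySem.List.pyGetD s.2.2 u (-1) + 1))
  else s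

lemma pvALoop_cons (adj : List (Int × List Int)) (fuel : Nat) (u : Int)
    (queue : List Int) (seen : PySem.Set Int) (levels : List Int) :
    pvBfsLoopA adj (fuel + 1) (u :: queue) seen levels
      = pvBfsLoopA adj fuel ((pvNbrsAscA adj u).foldl (pvALam u) (queue, seen, levels)).1
          ((pvNbrsAscA adj u).foldl (pvALam u) (queue, seen, levels)).2.1
          ((pvNbrsAscA adj u).foldl (pvALam u) (queue, seen, levels)).2.2 := rfl

lemma pvALoop_nil (adj : List (Int × List Int)) (fuel : Nat) (seen : PySem.Set Int)
    (levels : List Int) : pvBfsLoopA adj fuel [] seen levels = levels := by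
  cases fuel <;> rfl

lemma pvBLoop_nil (adj : List (Int × List Int)) (fuel : Nat) (seen : PySem.Set Int)
    (levels : List Int) : pvBfsLoopB adj fuel [] seen levels = levels := by
  cases fuel <;> rfl

lemma pvContains_add_fresh (seen : PySem.Set Int) (v w : Int)
    (hv : PySem.Set.contains seen v = false) :
    PySem.Set.contains (PySem.Set.add seen v) w
      = (PySem.Set.contains seen w || (w == v)) := by
  unfold PySem.Set.add
  rw [hv]
  simp only [Bool.false_eq_true, if_false, PySem.Set.contains, List.contains_append]
  by_cases hwv : w = v <;> simp [hwv]

-- A's interleaved check-mark scan over one node's neighbour list equals B's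
-- filter-first-then-mark step (the neighbour list has no duplicates)
lemma pvInnerBfs (u : Int) :
    ∀ (L : List Int), L.Nodup →
    ∀ (q : List Int) (seen : PySem.Set Int) (levels : List Int),
    L.foldl (pvALam u) (q, seen, levels)
      = (q ++ L.filter (fun v => PySem.Set.contains seen v = false),
         PySem.Set.update seen (L.filter (fun v => PySem.Set.contains seen v = false)),
         (L.filter (fun v => PySem.Set.contains seen v = false)).foldl
           (fun lv v => PySem.List.pySetD lv v (PySem.List.pyGetD lv u (-1) + 1))
           levels) := by
  intro L
  induction L with
  | nil => intro _ q seen levels; simp [PySem.Set.update]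
  | cons v L ih =>
    intro hnd q seen levels
    have hvL : v ∉ L := (List.nodup_cons.mp hnd).1
    rw [List.foldl_cons, List.filter_cons]
    cases hc : PySem.Set.contains seen v with
    | true =>
      have hA : pvALam u (q, seen, levels) v = (q, seen, levels) := by
        unfold pvALam
        rw [hc]
        simp
      rw [hA, ih (List.nodup_cons.mp hnd).2]
      simp
    | false =>
      have hA : pvALam u (q, seen, levels) v
          = (q ++ [v], PySem.Set.add seen v,
             PySem.List.pySetD levels v (PySem.List.pyGetD levels u (-1) + 1)) := by
        unfold pvALam
        rw [hc]
        simp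
      rw [hA, ih (List.nodup_cons.mp hnd).2]
      have hfe : L.filter (fun w => PySem.Set.contains (PySem.Set.add seen v) w = false)
          = L.filter (fun w => PySem.Set.contains seen w = false) := by
        apply List.filter_congr
        intro w hw
        have hwv : (w == v) = false := by
          simp only [beq_eq_false_iff_ne, ne_eq]
          intro h
          exact hvL (h ▸ hw)
        rw [pvContains_add_fresh seen v w hc, hwv, Bool.or_false]
      rw [hfe]
      refine Prod.ext ?_ (Prod.ext ?_ ?_)
      · simp [List.append_assoc]
      · simp [PySem.Set.update]
      · simp

lemma pvCntFlip {α : Type} [DecidableEq α] :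
    ∀ (l : List α) (p p' : α → Bool) (i : α),
    (∀ j ∈ l, j ≠ i → p' j = p j) → p i = false → p' i = true → l.Nodup → i ∈ l →
    l.countP p' = l.countP p + 1 := by
  intro l
  induction l with
  | nil => intro p p' i _ _ _ _ h; simp at h
  | cons a t ih =>
    intro p p' i hagree hpi hpi' hnd hmem
    have hapt : a ∉ t := (List.nodup_cons.mp hnd).1
    rcases List.mem_cons.mp hmem with rfl | hit
    · rw [List.countP_cons, List.countP_cons, hpi', hpi]
      have ht : t.countP p' = t.countP p :=
        List.countP_congr (fun j hj => by
          rw [hagree j (List.mem_cons_of_mem _ hj) (fun h => hapt (h ▸ hj))])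
      simp [ht]
    · have hai : a ≠ i := fun h => hapt (h ▸ hit)
      rw [List.countP_cons, List.countP_cons, hagree a List.mem_cons_self hai,
        ih p p' i (fun j hj hji => hagree j (List.mem_cons_of_mem _ hj) hji) hpi hpi'
          (List.nodup_cons.mp hnd).2 hit]
      cases hpa : p a <;> simp

-- number of already-seen ids in [0, n): A's fuel potential
def pvSeenCnt (seen : PySem.Set Int) (n : Nat) : Nat :=
  (List.range n).countP (fun i => PySem.Set.contains seen ((i : Nat) : Int))

lemma pvSeenCnt_le (seen : PySem.Set Int) (n : Nat) : pvSeenCnt seen n ≤ n := by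
  unfold pvSeenCnt
  exact le_trans List.countP_le_length (le_of_eq List.length_range)

lemma pvSeenCnt_add_fresh (seen : PySem.Set Int) (n : Nat) (v : Int)
    (hf : PySem.Set.contains seen v = false) (h0 : 0 ≤ v) (h1 : v.toNat < n) :
    pvSeenCnt (PySem.Set.add seen v) n = pvSeenCnt seen n + 1 := by
  unfold pvSeenCnt
  apply pvCntFlip (List.range n) _ _ v.toNat
  · intro j _ hji
    rw [pvContains_add_fresh seen v _ hf,
      show (((j : Nat) : Int) == v) = false by
        simp only [beq_eq_false_iff_ne, ne_eq]
        omega,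
      Bool.or_false]
  · rw [show ((v.toNat : Nat) : Int) = v by omega]
    exact hf
  · rw [show ((v.toNat : Nat) : Int) = v by omega,
      pvContains_add_fresh seen v _ hf]
    simp
  · exact List.nodup_range
  · exact List.mem_range.mpr h1

lemma pvSeenCnt_markAll (n : Nat) :
    ∀ (new : List Int) (seen : PySem.Set Int),
    new.Nodup → (∀ v ∈ new, pvGN n v) →
    (∀ v ∈ new, PySem.Set.contains seen v = false) →
    pvSeenCnt (PySem.Set.update seen new) n = pvSeenCnt seen n + new.length := by
  intro new
  induction new with
  | nil => intro seen _ _ _; simp [PySem.Set.update]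
  | cons v F ih =>
    intro seen hnd hgn hf
    have hvF : v ∉ F := (List.nodup_cons.mp hnd).1
    have hcv := hf v List.mem_cons_self
    have hupd : PySem.Set.update seen (v :: F)
        = PySem.Set.update (PySem.Set.add seen v) F := by
      simp [PySem.Set.update]
    rw [hupd, ih (PySem.Set.add seen v) (List.nodup_cons.mp hnd).2
        (fun w hw => hgn w (List.mem_cons_of_mem _ hw))
        (fun w hw => by
          have hwv : (w == v) = false := by
            simp only [beq_eq_false_iff_ne, ne_eq]
            intro h
            exact hvF (h ▸ hw)
          rw [pvContains_add_fresh seen v w hcv, hwv, Bool.or_false]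
          exact hf w (List.mem_cons_of_mem _ hw)),
      pvSeenCnt_add_fresh seen n v hcv (hgn v List.mem_cons_self).1
        (hgn v List.mem_cons_self).2]
    simp only [List.length_cons]
    omega

-- sorted(adj.get(u, set()) - seen) is the seen-filtered ascending neighbour list
lemma pvFresh_eq (adj : List (Int × List Int)) (u : Int) (seen : PySem.Set Int) :
    PySem.List.sorted
      (PySem.Set.diff (PySem.Set.ofList ((PySem.Dict.mk adj).getD u [])) seen)
      (fun x => x) false
    = (pvNbrsAscA adj u).filter (fun v => PySem.Set.contains seen v = false) := by
  apply PySem.List.sorted_eq_of_perm_of_pairwise_lt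
  · have hp : (pvNbrsAscA adj u).Perm
        (PySem.Set.ofList ((PySem.Dict.mk adj).getD u [])) :=
      PySem.List.sorted_perm _ _ _
    have := hp.filter (fun v => decide (PySem.Set.contains seen v = false))
    refine this.trans (List.Perm.of_eq ?_)
    unfold PySem.Set.diff
    apply List.filter_congr
    intro w _
    simp [PySem.Set.contains]
  · exact (PySem.List.sorted_ofList_pairwise_lt _).filter _

-- main simulation: A's queue loop from fr ++ nxt equals B resumed mid-round
-- (remaining frontier fr, accumulated next frontier nxt)
lemma pvBfsSim (adj : List (Int × List Int)) (n : Nat) (hadj : pvHR adj n) :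
    ∀ (fuelB : Nat) (fr nxt : List Int) (seen : PySem.Set Int) (levels : List Int)
      (fuelA : Nat),
    fr.length + nxt.length + (n - pvSeenCnt seen n) ≤ fuelA →
    (n - pvSeenCnt seen n) + nxt.length + 2 ≤ fuelB →
    pvBfsLoopA adj fuelA (fr ++ nxt) seen levels
      = pvBfsLoopB adj fuelB (fr.foldl (pvBfsStepB adj) (nxt, seen, levels)).1
          (fr.foldl (pvBfsStepB adj) (nxt, seen, levels)).2.1
          (fr.foldl (pvBfsStepB adj) (nxt, seen, levels)).2.2 := by
  intro fuelB
  induction fuelB with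
  | zero => intro fr nxt seen levels fuelA _ hB; omega
  | succ g ihB =>
    intro fr
    induction fr with
    | nil =>
      intro nxt seen levels fuelA hA hB
      simp only [List.foldl_nil, List.nil_append]
      by_cases hnil : nxt = []
      · subst hnil
        rw [pvALoop_nil, pvBLoop_nil]
      · have hne : nxt.isEmpty = false := by simp [hnil]
        rw [show pvBfsLoopB adj (g + 1) nxt seen levels
            = pvBfsLoopB adj g (nxt.foldl (pvBfsStepB adj) ([], seen, levels)).1
                (nxt.foldl (pvBfsStepB adj) ([], seen, levels)).2.1
                (nxt.foldl (pvBfsStepB adj) ([], seen, levels)).2.2 by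
          simp only [pvBfsLoopB, hne]
          rfl]
        have hlen1 : 1 ≤ nxt.length := List.length_pos_of_ne_nil hnil
        have := ihB nxt [] seen levels fuelA
          (by simpa using hA)
          (by simp only [List.length_nil]; omega)
        rw [← this]
        simp
    | cons u fr' ihf =>
      intro nxt seen levels fuelA hA hB
      simp only [List.length_cons] at hA hB
      obtain ⟨fA', rfl⟩ : ∃ a, fuelA = a + 1 := ⟨fuelA - 1, by omega⟩
      rw [List.cons_append, pvALoop_cons,
        pvInnerBfs u (pvNbrsAscA adj u) (pvNbrs_nodup adj u) (fr' ++ nxt) seen levels]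
      have hstep : pvBfsStepB adj (nxt, seen, levels) u
          = (nxt ++ (pvNbrsAscA adj u).filter
                (fun v => PySem.Set.contains seen v = false),
             PySem.Set.update seen ((pvNbrsAscA adj u).filter
                (fun v => PySem.Set.contains seen v = false)),
             ((pvNbrsAscA adj u).filter
                (fun v => PySem.Set.contains seen v = false)).foldl
               (fun lv v => PySem.List.pySetD lv v (PySem.List.pyGetD lv u (-1) + 1))
               levels) := by
        simp only [pvBfsStepB]
        rw [pvFresh_eq adj u seen]
      set new := (pvNbrsAscA adj u).filter
        (fun v => PySem.Set.contains seen v = false) with hnew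
      have hnewnd : new.Nodup := (pvNbrs_nodup adj u).filter _
      have hnewgn : ∀ v ∈ new, pvGN n v :=
        fun v hv => pvNbrs_GN adj n u hadj v (List.mem_of_mem_filter hv)
      have hnewf : ∀ v ∈ new, PySem.Set.contains seen v = false := by
        intro v hv
        have := List.of_mem_filter hv
        simpa using this
      have hcnt : pvSeenCnt (PySem.Set.update seen new) n
          = pvSeenCnt seen n + new.length :=
        pvSeenCnt_markAll n new seen hnewnd hnewgn hnewf
      have hcle : pvSeenCnt (PySem.Set.update seen new) n ≤ n := pvSeenCnt_le _ _
      have := ihf (nxt ++ new) (PySem.Set.update seen new)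
        (new.foldl
          (fun lv v => PySem.List.pySetD lv v (PySem.List.pyGetD lv u (-1) + 1))
          levels)
        fA'
        (by
          simp only [List.length_append]
          omega)
        (by
          simp only [List.length_append]
          omega)
      rw [show (fr' ++ nxt) ++ new = fr' ++ (nxt ++ new) from List.append_assoc _ _ _,
        this]
      simp only [List.foldl_cons, hstep]

-- the comprehension initialisations equal A's set-one-cell initialisations
lemma pvInitLevels (root N : Int) (h0 : 0 ≤ root) (h1 : root < N) :
    (PySem.List.pyRange 0 N 1).map (fun i => if i == root then 0 else -1)
      = PySem.List.pySetD (List.replicate N.toNat (-1)) root 0 := by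
  rw [PySem.List.pySetD_of_nonneg _ _ h0]
  apply List.ext_getElem
  · rw [List.length_map, PySem.List.length_pyRange_one, List.length_set,
      List.length_replicate]
    omega
  · intro i h1i h2i
    have hi : i < (PySem.List.pyRange 0 N 1).length := by
      rw [PySem.List.length_pyRange_one]
      rw [List.length_set, List.length_replicate] at h2i
      omega
    rw [List.getElem_map, PySem.List.getElem_pyRange_one _ _ _ hi, List.getElem_set]
    by_cases hri : root.toNat = i
    · rw [if_pos hri, if_pos (show ((0 : Int) + (i : Int) == root) = true by
        rw [beq_iff_eq]; omega)]
    · rw [if_neg hri, if_neg (show ¬ (((0 : Int) + (i : Int) == root) = true) by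
        rw [beq_iff_eq]; omega), List.getElem_replicate]

lemma pvInitSeen2 (root N : Int) (h0 : 0 ≤ root) (h1 : root < N) :
    (PySem.List.pyRange 0 N 1).map (fun i => i == root)
      = PySem.List.pySetD (List.replicate N.toNat false) root true := by
  rw [PySem.List.pySetD_of_nonneg _ _ h0]
  apply List.ext_getElem
  · rw [List.length_map, PySem.List.length_pyRange_one, List.length_set,
      List.length_replicate]
    omega
  · intro i h1i h2i
    have hi : i < (PySem.List.pyRange 0 N 1).length := by
      rw [PySem.List.length_pyRange_one]
      rw [List.length_set, List.length_replicate] at h2i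
      omega
    rw [List.getElem_map, PySem.List.getElem_pyRange_one _ _ _ hi, List.getElem_set]
    by_cases hri : root.toNat = i
    · rw [if_pos hri]
      rw [show ((0 : Int) + (i : Int) == root) = true by rw [beq_iff_eq]; omega]
    · rw [if_neg hri, List.getElem_replicate]
      rw [show ((0 : Int) + (i : Int) == root) = false by
        rw [beq_eq_false_iff_ne]; intro h; exact hri (by omega)]

-- ===== VERDICT (by name: the statement is the Claim_ definition above) =====
theorem DFS_Order_With_Levels_spec : Claim_equal_DFS_Order_With_Levels := by
  intro adj root N _ hpre
  unfold Spec_DFS_Order_With_Levels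
  simp only [DFS_Order_With_Levels, DFS_Order_With_Levels_alt]
  by_cases hz : N = 0
  · subst hz
    simp
  · by_cases hact : root < N ∧ ((PySem.Dict.mk adj).get? root).isSome
    · obtain ⟨hroot0, hHR⟩ := hpre hact
      have hrootN : root < N := hact.1
      have hN : 0 < N := by omega
      have hroots : ((PySem.Dict.mk adj).get? root).isSome = true := hact.2
      have hBne : ¬ (N = 0 ∨ N ≤ root ∨ (PySem.Dict.mk adj).get? root = none) := by
        intro h
        rcases h with h | h | h
        · exact hz h
        · omega
        · rw [h] at hroots
          exact absurd hroots (by simp)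
      rw [if_neg (show ¬ ((N == 0) = true) by simp [hz]), if_pos hact, if_neg hBne]
      have hadj : pvHR adj N.toNat := by
        intro p hp v hv
        obtain ⟨h0, h1⟩ := hHR p hp v hv
        exact ⟨h0, by omega⟩
      rw [pvInitLevels root N hroot0 hrootN, pvInitSeen2 root N hroot0 hrootN]
      -- BFS: levels agree
      have hlv : pvBfsLoopA adj (pvFuel adj N) [root] (PySem.Set.ofList [root])
            (PySem.List.pySetD (List.replicate N.toNat (-1)) root 0)
          = pvBfsLoopB adj (pvFuelB N) [root] (PySem.Set.ofList [root])
              (PySem.List.pySetD (List.replicate N.toNat (-1)) root 0) := by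
        rw [show pvBfsLoopB adj (pvFuelB N) [root] (PySem.Set.ofList [root])
              (PySem.List.pySetD (List.replicate N.toNat (-1)) root 0)
            = pvBfsLoopB adj (N.toNat + 2)
                ([root].foldl (pvBfsStepB adj)
                  ([], PySem.Set.ofList [root],
                   PySem.List.pySetD (List.replicate N.toNat (-1)) root 0)).1
                ([root].foldl (pvBfsStepB adj)
                  ([], PySem.Set.ofList [root],
                   PySem.List.pySetD (List.replicate N.toNat (-1)) root 0)).2.1
                ([root].foldl (pvBfsStepB adj)
                  ([], PySem.Set.ofList [root],
                   PySem.List.pySetD (List.replicate N.toNat (-1)) root 0)).2.2 by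
          rfl]
        have hsle := pvSeenCnt_le (PySem.Set.ofList [root]) N.toNat
        have := pvBfsSim adj N.toNat hadj (N.toNat + 2) [root] []
          (PySem.Set.ofList [root])
          (PySem.List.pySetD (List.replicate N.toNat (-1)) root 0)
          (pvFuel adj N)
          (by
            unfold pvFuel
            simp only [List.length_cons, List.length_nil]
            omega)
          (by
            simp only [List.length_nil]
            omega)
        simpa using this
      rw [hlv]
      -- DFS: identical levels, stack loop vs recursion
      have hsnlen : (PySem.List.pySetD (List.replicate N.toNat false) root true).length
          = N.toNat := by
        rw [PySem.List.length_pySetD, List.length_replicate]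
      have hcnt : (PySem.List.pySetD (List.replicate N.toNat false) root true).count false
          ≤ N.toNat := le_trans List.count_le_length (le_of_eq hsnlen)
      have hm := pvMain adj
        (pvBfsLoopB adj (pvFuelB N) [root] (PySem.Set.ofList [root])
          (PySem.List.pySetD (List.replicate N.toNat (-1)) root 0))
        N.toNat hadj
        ((PySem.List.pySetD (List.replicate N.toNat false) root true).count false)
        (PySem.List.pySetD (List.replicate N.toNat false) root true)
        le_rfl hsnlen [root] [] (pvFuel adj N) (pvFuel adj N)
        (by unfold pvFuel; simp; omega) (by unfold pvFuel; omega)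
      simp only [List.foldl_cons, List.foldl_nil] at hm
      rw [hm]
    · have hByes : N = 0 ∨ N ≤ root ∨ (PySem.Dict.mk adj).get? root = none := by
        by_cases hr : root < N
        · have hns : ¬ (((PySem.Dict.mk adj).get? root).isSome = true) :=
            fun hs => hact ⟨hr, hs⟩
          exact Or.inr (Or.inr (Option.not_isSome_iff_eq_none.mp hns))
        · exact Or.inr (Or.inl (by omega))
      rw [if_neg (show ¬ ((N == 0) = true) by simp [hz]), if_neg hact, if_pos hByes]
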